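-- pv_equiv track=rewrite | github.com/cizins/2026-python | weeks/week-05/solutions/1114405042/solution_10057.py | solve
-- ===== SOURCE A (Python) =====
-- def solve(n, arr):
--     """
--     計算 UVA 10057: Mid-Summer Night's Dream 的三個答案。
--     1. 能使距離總和最小的最小可能的 A (中位數)。
--     2. 在原本輸入的陣列中，有多少個數字等於任何一個最佳的 A。
--     3. 總共有幾種可能的 A 值。
--     """
--     arr.sort()
--
--     # 計算最佳的 A 的範圍 (中位數區間)
--     if n % 2 == 1:
--         # 如果是奇數，中位數只有一個
--         min_a = arr[n // 2]
--         max_a = arr[n // 2]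
--     else:
--         # 如果是偶數，中位數是中間兩個數字及其之間的任何整數
--         min_a = arr[n // 2 - 1]
--         max_a = arr[n // 2]
--
--     # 計算陣列中有多少個元素落在 [min_a, max_a] 區間內
--     # 這些元素就是「符合最佳 A 條件的原本輸入數字」
--     count = 0
--     for x in arr:
--         if min_a <= x <= max_a:
--             count += 1
--
--     # 計算有幾種可能的 A 值
--     # 也就是區間 [min_a, max_a] 內包含的整數數量
--     possible_a_count = max_a - min_a + 1
--
--     return min_a, count, possible_a_count
-- ===== SOURCE B (Python) =====
-- def solve(n, arr):
--     # Quickselect for the two middle order statistics (no sort), then one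
--     # counting pass over the unsorted input. Note: A sorts arr in place;
--     # B does not mutate arr (return-value equivalence only).
--     def select(xs, k):
--         while True:
--             p = xs[0]
--             lt = [x for x in xs if x < p]
--             if k < len(lt):
--                 xs = lt
--                 continue
--             gt = [x for x in xs if x > p]
--             eq = len(xs) - len(lt) - len(gt)
--             if k < len(lt) + eq:
--                 return p
--             k -= len(lt) + eq
--             xs = gt
--
--     lo = select(arr, (n - 1) // 2)
--     hi = select(arr, n // 2)
--     count = sum(1 for x in arr if lo <= x <= hi)
--     return lo, count, hi - lo + 1
-- ===== Notes on version B (the rewrite author's own statement) =====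
-- stated objective: alternative
-- what changed: B replaces sort-then-index by quickselect for the two middle order statistics plus a single counting pass over the unsorted input (asymptotically O(n) expected vs O(n log n), but not measurably faster in CPython, where the built-in sort is C-implemented); B also does not mutate arr.
-- outside the precondition, e.g. on solve(-1, [5]): A returns (5, 1, 1), B raises IndexError; on solve(0, [5]): A returns (5, 1, 1), B raises IndexError
import Mathlib
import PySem

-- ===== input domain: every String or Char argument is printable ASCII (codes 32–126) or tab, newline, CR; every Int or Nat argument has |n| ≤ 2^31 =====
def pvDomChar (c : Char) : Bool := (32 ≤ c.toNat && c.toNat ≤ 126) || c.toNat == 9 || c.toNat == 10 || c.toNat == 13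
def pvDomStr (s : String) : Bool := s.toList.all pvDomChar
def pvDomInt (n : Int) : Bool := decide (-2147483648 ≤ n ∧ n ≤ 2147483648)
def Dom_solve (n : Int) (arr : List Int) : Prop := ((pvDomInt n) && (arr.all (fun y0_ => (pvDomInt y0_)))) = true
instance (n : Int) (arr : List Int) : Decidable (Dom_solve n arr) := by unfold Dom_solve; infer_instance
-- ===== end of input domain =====

-- B replaces sort-then-index by quickselect for the two middle order statistics plus one
-- counting pass over the unsorted input (alternative algorithm, similar measured cost).
-- A sorts arr in place; B does not mutate it — the equivalence proved here is about the
-- RETURN value only.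

-- ===== PORT A =====
def solve (n : Int) (arr : List Int) : List Int :=
  let s := PySem.List.sorted arr (fun x => x) false
  let mm : Option (Int × Int) :=
    if PySem.Int.mod n 2 = 1 then
      match PySem.List.pyGet? s (PySem.Int.floordiv n 2) with
      | some m => some (m, m)
      | none => none
    else
      match PySem.List.pyGet? s (PySem.Int.floordiv n 2 - 1),
            PySem.List.pyGet? s (PySem.Int.floordiv n 2) with
      | some a, some b => some (a, b)
      | _, _ => none
  match mm with
  | none => []  -- unreachable under Pre_solve (IndexError in Python)
  | some (mn, mx) =>
    let count := s.foldl (fun acc x => if mn ≤ x ∧ x ≤ mx then acc + 1 else acc) (0 : Int)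
    [mn, count, mx - mn + 1]

-- ===== PORT B =====
-- quickselect: B's select(xs, k); none = IndexError (xs becomes empty)
def qsel : List Int → Int → Option Int
  | [], _ => none
  | p :: t, k =>
    let lt := (p :: t).filter (fun x => decide (x < p))
    if k < (lt.length : Int) then qsel lt k
    else
      let gt := (p :: t).filter (fun x => decide (p < x))
      let eq : Int := ((p :: t).length : Int) - lt.length - gt.length
      if k < (lt.length : Int) + eq then some p
      else qsel gt (k - ((lt.length : Int) + eq))
  termination_by xs _ => xs.length
  decreasing_by
  · simp
    exact List.length_filter_le _ _
  · simp
    exact List.length_filter_le _ _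

def solve_alt (n : Int) (arr : List Int) : List Int :=
  -- none = IndexError in Python (unreachable under Pre_solve)
  ((qsel arr (PySem.Int.floordiv (n - 1) 2)).bind (fun lo =>
    (qsel arr (PySem.Int.floordiv n 2)).map (fun hi =>
      let count := arr.foldl (fun acc x => if lo ≤ x ∧ x ≤ hi then acc + 1 else acc) (0 : Int)
      [lo, count, hi - lo + 1]))).getD []

-- ===== PRECONDITION & SPEC =====
-- Pre_ excludes inputs where A raises IndexError, and the inputs (n ≤ 0) where A only
-- returns via Python's negative-index wraparound — an artefact of A's indexing on which
-- B's quickselect itself raises IndexError.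
def Pre_solve (n : Int) (arr : List Int) : Prop :=
  0 ≤ n ∧ PySem.Int.floordiv n 2 < (arr.length : Int) ∧ (PySem.Int.mod n 2 = 0 → 2 ≤ n)
instance (n : Int) (arr : List Int) : Decidable (Pre_solve n arr) := by
  unfold Pre_solve; infer_instance

def pvWitness_solve : Int × List Int := (4, [3, 1, 2, 5])

def Spec_solve (n : Int) (arr : List Int) (out : List Int) : Prop := out = solve_alt n arr
instance (n : Int) (arr : List Int) (out : List Int) : Decidable (Spec_solve n arr out) := by
  unfold Spec_solve; infer_instance

-- ===== CLAIM (what is proved, stated in full; the proofs are below) =====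
def Claim_equal_solve : Prop :=
  ∀ (n : Int) (arr : List Int), Dom_solve n arr → Pre_solve n arr →
    Spec_solve n arr (solve n arr)

-- ===== LEMMAS AND PROOFS =====

theorem count_filter_zero (a : Int) (q : Int → Bool) (xs : List Int) (h : q a = false) :
    List.count a (xs.filter q) = 0 := by
  rw [List.count_eq_zero]
  simp [List.mem_filter, h]

theorem perm_part (p : Int) (xs : List Int) :
    xs.Perm (xs.filter (fun x => decide (x < p)) ++ xs.filter (fun x => decide (x = p)) ++ xs.filter (fun x => decide (p < x))) := by
  rw [List.perm_iff_count]
  intro a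
  simp only [List.count_append]
  rcases lt_trichotomy a p with h | h | h
  · rw [List.count_filter (by simp [h]), count_filter_zero a _ _ (by simp; omega),
      count_filter_zero a _ _ (by simp; omega)]
    omega
  · rw [count_filter_zero a _ _ (by simp; omega), List.count_filter (by simp [h]),
      count_filter_zero a _ _ (by simp; omega)]
    omega
  · rw [count_filter_zero a _ _ (by simp; omega), count_filter_zero a _ _ (by simp; omega),
      List.count_filter (by simp [h])]
    omega

theorem sorted_decomp (p : Int) (xs : List Int) :
    PySem.List.sorted xs (fun x => x) false =
      PySem.List.sorted (xs.filter (fun x => decide (x < p))) (fun x => x) false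
      ++ xs.filter (fun x => decide (x = p))
      ++ PySem.List.sorted (xs.filter (fun x => decide (p < x))) (fun x => x) false := by
  apply PySem.List.sorted_id_eq_of_perm_of_pairwise
  · exact (((PySem.List.sorted_perm _ _ _).append (List.Perm.refl _)).append
      (PySem.List.sorted_perm _ _ _)).trans (perm_part p xs).symm
  · rw [List.pairwise_append, List.pairwise_append]
    refine ⟨⟨PySem.List.sorted_pairwise _ _, List.pairwise_of_forall_mem_list ?_, ?_⟩,
      PySem.List.sorted_pairwise _ _, ?_⟩
    · intro a ha b hb
      simp [List.mem_filter] at ha hb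
      omega
    · intro a ha b hb
      rw [PySem.List.mem_sorted] at ha
      simp [List.mem_filter] at ha hb
      omega
    · intro a ha b hb
      rw [PySem.List.mem_sorted] at hb
      rw [List.mem_append] at ha
      rcases ha with ha | ha
      · rw [PySem.List.mem_sorted] at ha
        simp [List.mem_filter] at ha hb
        omega
      · simp [List.mem_filter] at ha hb
        omega

theorem qsel_correct (N : Nat) : ∀ (xs : List Int) (k : Int), xs.length ≤ N → 0 ≤ k →
    k < (xs.length : Int) →
    qsel xs k = PySem.List.pyGet? (PySem.List.sorted xs (fun x => x) false) k := by
  induction N with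
  | zero => intro xs k hN h0 h1; omega
  | succ N ih =>
    intro xs k hN h0 h1
    match xs with
    | [] => simp at h1; omega
    | p :: t =>
      have hlen := (perm_part p (p :: t)).length_eq
      simp only [List.length_append] at hlen
      have hltlen : (List.filter (fun x => decide (x < p)) (p :: t)).length ≤ t.length := by
        rw [List.filter_cons, show (decide (p < p)) = false by simp]
        exact List.length_filter_le _ _
      have hgtlen : (List.filter (fun x => decide (p < x)) (p :: t)).length ≤ t.length := by
        rw [List.filter_cons, show (decide (p < p)) = false by simp]
        exact List.length_filter_le _ _
      rw [PySem.List.pyGet?_of_nonneg _ h0, sorted_decomp p (p :: t)]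
      simp only [qsel]
      simp only [List.length_cons] at h1 hN hlen
      split_ifs with hb1 hb2
      · -- k < len(lt): recurse into lt
        rw [ih _ k (by omega) h0 hb1, PySem.List.pyGet?_of_nonneg _ h0]
        rw [List.getElem?_append_left (by
              simp only [List.length_append, PySem.List.length_sorted]; omega),
          List.getElem?_append_left (by rw [PySem.List.length_sorted]; omega)]
      · -- pivot found
        simp only [List.length_cons] at hb2
        rw [List.getElem?_append_left (by
              simp only [List.length_append, PySem.List.length_sorted]; omega),
          List.getElem?_append_right (by rw [PySem.List.length_sorted]; omega),
          List.getElem?_eq_getElem (by simp only [PySem.List.length_sorted]; omega)]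
        have hm := List.getElem_mem
          (by simp only [PySem.List.length_sorted]; omega :
            k.toNat - (PySem.List.sorted (List.filter (fun x => decide (x < p)) (p :: t)) (fun x => x) false).length
              < (List.filter (fun x => decide (x = p)) (p :: t)).length)
        rw [List.mem_filter] at hm
        simp only [decide_eq_true_eq] at hm
        rw [hm.2]
      · -- recurse into gt
        simp only [List.length_cons] at hb2
        have hk' : (0:Int) ≤ k - (((List.filter (fun x => decide (x < p)) (p :: t)).length : Int)
            + ((((p :: t).length : Int)) - (List.filter (fun x => decide (x < p)) (p :: t)).length
              - (List.filter (fun x => decide (p < x)) (p :: t)).length)) := by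
          simp only [List.length_cons]; omega
        have hk'2 : k - (((List.filter (fun x => decide (x < p)) (p :: t)).length : Int)
            + ((((p :: t).length : Int)) - (List.filter (fun x => decide (x < p)) (p :: t)).length
              - (List.filter (fun x => decide (p < x)) (p :: t)).length))
            < ((List.filter (fun x => decide (p < x)) (p :: t)).length : Int) := by
          simp only [List.length_cons]; omega
        rw [ih _ _ (by omega) hk' hk'2, PySem.List.pyGet?_of_nonneg _ hk']
        rw [List.getElem?_append_right (by
              simp only [List.length_append, PySem.List.length_sorted]; omega)]
        congr 1
        simp only [List.length_append, PySem.List.length_sorted, List.length_cons]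
        omega

theorem solve_spec_aux (n : Int) (arr : List Int) (h : Pre_solve n arr) :
    solve n arr = solve_alt n arr := by
  obtain ⟨hn0, hlt, hev⟩ := h
  have hmod : PySem.Int.mod n 2 = n % 2 := PySem.Int.mod_eq_emod_of_pos (by norm_num)
  have hfd : PySem.Int.floordiv n 2 = n / 2 := PySem.Int.floordiv_eq_ediv_of_pos (by norm_num)
  rw [hfd] at hlt
  rw [hmod] at hev
  have hn1 : 1 ≤ n := by omega
  have hsl : (PySem.List.sorted arr (fun x => x) false).length = arr.length :=
    PySem.List.length_sorted _ _ _
  have hcnt : ∀ (a b : Int),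
      (PySem.List.sorted arr (fun x => x) false).foldl
        (fun acc x => if a ≤ x ∧ x ≤ b then acc + 1 else acc) (0:Int)
      = arr.foldl (fun acc x => if a ≤ x ∧ x ≤ b then acc + 1 else acc) (0:Int) := by
    intro a b
    rw [PySem.List.foldl_ite_add_one, PySem.List.foldl_ite_add_one,
      (PySem.List.sorted_perm arr (fun x => x) false).countP_eq]
  have hq2 : qsel arr (PySem.Int.floordiv n 2)
      = some ((PySem.List.sorted arr (fun x => x) false)[(n / 2).toNat]'(by omega)) := by
    rw [hfd, qsel_correct arr.length arr (n / 2) le_rfl (by omega) (by omega),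
      PySem.List.pyGet?_eq_some_getElem _ (by omega) (by rw [hsl]; omega)]
  have hq1 : qsel arr (PySem.Int.floordiv (n - 1) 2)
      = some ((PySem.List.sorted arr (fun x => x) false)[((n - 1) / 2).toNat]'(by omega)) := by
    rw [PySem.Int.floordiv_eq_ediv_of_pos (by norm_num),
      qsel_correct arr.length arr ((n - 1) / 2) le_rfl (by omega) (by omega),
      PySem.List.pyGet?_eq_some_getElem _ (by omega) (by rw [hsl]; omega)]
  unfold solve solve_alt
  simp only [hq1, hq2, Option.bind_some, Option.map_some, Option.getD_some]
  simp only [hmod, hfd]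
  by_cases hpar : n % 2 = 1
  · rw [if_pos hpar]
    rw [PySem.List.pyGet?_eq_some_getElem _ (by omega) (by rw [hsl]; omega)]
    have hix : (n - 1) / 2 = n / 2 := by omega
    simp only [hix, hcnt]
  · rw [if_neg hpar]
    rw [PySem.List.pyGet?_eq_some_getElem _ (by omega) (by rw [hsl]; omega),
      PySem.List.pyGet?_eq_some_getElem _ (by omega) (by rw [hsl]; omega)]
    have hix : (n - 1) / 2 = n / 2 - 1 := by omega
    simp only [hix, hcnt]

-- ===== VERDICT (by name: the statement is the Claim_ definition above) =====
theorem solve_spec : Claim_equal_solve := by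
  intro n arr _ hpre
  exact solve_spec_aux n arr hpre
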